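-- pv_equiv track=rewrite | github.com/LucaMica02/AlgorithmsCourseSapienza | Dynamic_Programming/Dynamic_Programming_Exercises.py | findSubset3
-- ===== SOURCE A (Python) =====
-- def findSubset3(array, C):
--     n = len(array)
--     memo = [[0]*(C + 1) for i in range(n+1)]
--     for i in range(1, n+1):
--         for j in range(C+1):
--             if j < array[i-1]:
--                 memo[i][j] = memo[i-1][j]
--             else:
--                 memo[i][j] = max(memo[i-1][j], memo[i-1][j-array[i-1]] + array[i-1])
--     return memo[n][C]
-- ===== SOURCE B (Python) =====
-- def findSubset3(array, C):
--     reachable = {0}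
--     for x in array:
--         reachable |= {s + x for s in reachable if s + x <= C}
--     return max(reachable)
-- ===== Notes on version B (the rewrite author's own statement) =====
-- stated objective: alternative
-- what changed: Replaces the (n+1)x(C+1) DP table scanned over every capacity j for every item with a growing set of reachable subset sums (reachable |= {s+x for s in reachable if s+x<=C}), returning max(reachable).
import Mathlib
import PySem

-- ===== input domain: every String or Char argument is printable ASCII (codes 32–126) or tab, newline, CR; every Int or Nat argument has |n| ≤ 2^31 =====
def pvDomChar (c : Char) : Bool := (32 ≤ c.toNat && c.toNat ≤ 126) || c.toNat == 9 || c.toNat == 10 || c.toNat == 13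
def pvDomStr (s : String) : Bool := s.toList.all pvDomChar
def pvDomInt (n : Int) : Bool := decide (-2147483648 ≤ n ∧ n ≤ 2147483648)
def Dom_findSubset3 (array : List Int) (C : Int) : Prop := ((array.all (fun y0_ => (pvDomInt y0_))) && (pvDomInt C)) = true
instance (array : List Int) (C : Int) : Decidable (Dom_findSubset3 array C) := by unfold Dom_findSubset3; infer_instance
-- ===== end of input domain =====

-- B replaces A's (n+1)x(C+1) DP table with a growing set of reachable subset sums ≤ C;
-- equal on all inputs where A returns (Pre_: C ≥ 0 and non-negative elements; elsewhere A raises IndexError).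


-- ===== PORT A =====
-- literal port of A: build row i from row i-1 for each item, then read memo[n][C];
-- out-of-range reads (which raise IndexError in Python) are excluded by Pre_findSubset3.
def findSubset3 (array : List Int) (C : Int) : Int :=
  let memoN : List Int :=
    array.foldl
      (fun prev x =>
        (PySem.List.pyRange 0 (C + 1)).map (fun j =>
          if j < x then PySem.List.pyGetD prev j 0
          else max (PySem.List.pyGetD prev j 0) (PySem.List.pyGetD prev (j - x) 0 + x)))
      (List.replicate (C + 1).toNat 0)
  PySem.List.pyGetD memoN C 0

-- ===== PORT B =====
-- port of Source B: reachable = {0}; for x: reachable |= {s+x for s in reachable if s+x <= C}; return max(reachable)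
def findSubset3_alt (array : List Int) (C : Int) : Int :=
  let reachable : PySem.Set Int :=
    array.foldl
      (fun r x => PySem.Set.union r (PySem.Set.ofList ((r.filter (fun s => s + x ≤ C)).map (fun s => s + x))))
      (PySem.Set.ofList [0])
  (PySem.List.max? reachable (fun y => y)).getD 0

-- ===== PRECONDITION & SPEC =====
-- Pre_ is exactly where the Python A returns: C ≥ 0 and all elements ≥ 0 (otherwise A raises IndexError).
def Pre_findSubset3 (array : List Int) (C : Int) : Prop := 0 ≤ C ∧ ∀ x ∈ array, 0 ≤ x
instance (array : List Int) (C : Int) : Decidable (Pre_findSubset3 array C) := by unfold Pre_findSubset3; infer_instance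
def pvWitness_findSubset3 : List Int × Int := ([3, 5, 2], 10)

def Spec_findSubset3 (array : List Int) (C : Int) (out : Int) : Prop := out = findSubset3_alt array C
instance (array : List Int) (C : Int) (out : Int) : Decidable (Spec_findSubset3 array C out) := by unfold Spec_findSubset3; infer_instance

-- ===== CLAIM (what is proved, stated in full; the proofs are below) =====
def Claim_equal_findSubset3 : Prop := ∀ (array : List Int) (C : Int), Dom_findSubset3 array C → Pre_findSubset3 array C → Spec_findSubset3 array C (findSubset3 array C)

-- ===== LEMMAS AND PROOFS =====

-- the multiset of subset sums of p, built left-to-right (matches both folds' snoc structure)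
def pvSums (p : List Int) : List Int := p.foldl (fun acc x => acc ++ acc.map (· + x)) [0]

-- M p j = the best subset sum of p not exceeding j (as A's memo row entry computes it)
def pvM (p : List Int) (j : Int) : Int := ((pvSums p).filter (fun s => s ≤ j)).foldl max 0

theorem pvSums_append (p : List Int) (x : Int) :
    pvSums (p ++ [x]) = pvSums p ++ (pvSums p).map (· + x) := by
  simp [pvSums, List.foldl_append]

theorem pvSums_zero_mem (p : List Int) : 0 ∈ pvSums p := by
  suffices h : ∀ (p : List Int) (acc : List Int), 0 ∈ acc →
      0 ∈ p.foldl (fun acc x => acc ++ acc.map (· + x)) acc by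
    exact h p [0] (by simp)
  intro p
  induction p with
  | nil => intro acc h; simpa using h
  | cons y q ih =>
    intro acc h
    exact ih _ (by simp [h])

theorem pvSums_nonneg (p : List Int) (hp : ∀ x ∈ p, 0 ≤ x) : ∀ s ∈ pvSums p, 0 ≤ s := by
  suffices h : ∀ (p : List Int), (∀ x ∈ p, 0 ≤ x) → ∀ (acc : List Int), (∀ s ∈ acc, 0 ≤ s) →
      ∀ s ∈ p.foldl (fun acc x => acc ++ acc.map (· + x)) acc, 0 ≤ s by
    exact h p hp [0] (by simp)
  intro p
  induction p with
  | nil => intro _ acc hacc s hs; exact hacc s (by simpa using hs)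
  | cons y q ih =>
    intro hp acc hacc
    refine ih (fun x hx => hp x (List.mem_cons_of_mem _ hx)) _ ?_
    intro s hs
    rcases List.mem_append.1 hs with h | h
    · exact hacc s h
    · rcases List.mem_map.1 h with ⟨t, ht, rfl⟩
      have := hacc t ht
      have := hp y (List.mem_cons_self)
      omega

theorem pvF_append (l1 l2 : List Int) :
    (l1 ++ l2).foldl max 0 = max (l1.foldl max 0) (l2.foldl max 0) := by
  have h1 := PySem.List.le_foldl_max l1 (0 : Int)
  have h2 := PySem.List.le_foldl_max l2 (0 : Int)
  have h12 := PySem.List.le_foldl_max (l1 ++ l2) (0 : Int)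
  apply le_antisymm
  · rcases PySem.List.foldl_max_mem (l1 ++ l2) (0 : Int) with h | h
    · rw [h]; exact le_max_of_le_left h1.1
    · rcases List.mem_append.1 h with h | h
      · exact le_max_of_le_left (h1.2 _ h)
      · exact le_max_of_le_right (h2.2 _ h)
  · apply max_le
    · rcases PySem.List.foldl_max_mem l1 (0 : Int) with h | h
      · rw [h]; exact h12.1
      · exact h12.2 _ (List.mem_append_left _ h)
    · rcases PySem.List.foldl_max_mem l2 (0 : Int) with h | h
      · rw [h]; exact h12.1
      · exact h12.2 _ (List.mem_append_right _ h)

theorem pvF_map_add (l : List Int) (x : Int) (hx : 0 ≤ x) (h0 : 0 ∈ l) :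
    (l.map (· + x)).foldl max 0 = l.foldl max 0 + x := by
  have hl := PySem.List.le_foldl_max l (0 : Int)
  have hm := PySem.List.le_foldl_max (l.map (· + x)) (0 : Int)
  apply le_antisymm
  · rcases PySem.List.foldl_max_mem (l.map (· + x)) (0 : Int) with h | h
    · rw [h]; have := hl.1; omega
    · rcases List.mem_map.1 h with ⟨s, hs, hsx⟩
      rw [← hsx]
      have := hl.2 s hs; omega
  · rcases PySem.List.foldl_max_mem l (0 : Int) with h | h
    · rw [h]
      have : (0 : Int) + x ∈ l.map (· + x) := List.mem_map.2 ⟨0, h0, rfl⟩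
      have := hm.2 _ this; omega
    · have : (l.foldl max 0) + x ∈ l.map (· + x) := List.mem_map.2 ⟨_, h, rfl⟩
      exact hm.2 _ this

theorem pvM_nil (j : Int) (hj : 0 ≤ j) : pvM [] j = 0 := by
  simp [pvM, pvSums, hj]

theorem pvM_snoc (p : List Int) (x j : Int) (hx : 0 ≤ x)
    (hs : ∀ s ∈ pvSums p, 0 ≤ s) :
    pvM (p ++ [x]) j = if j < x then pvM p j else max (pvM p j) (pvM p (j - x) + x) := by
  rw [pvM, pvSums_append, List.filter_append]
  by_cases hcase : j < x
  · have hmap : ((pvSums p).map (· + x)).filter (fun s => decide (s ≤ j)) = [] := by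
      rw [List.filter_eq_nil_iff]
      intro a ha
      rcases List.mem_map.1 ha with ⟨s, hsm, rfl⟩
      have := hs s hsm
      simp only [decide_eq_true_eq]
      omega
    rw [hmap, List.append_nil, if_pos hcase, pvM]
  · rw [if_neg hcase]
    have hmap : ((pvSums p).map (· + x)).filter (fun s => decide (s ≤ j))
        = ((pvSums p).filter (fun s => decide (s ≤ j - x))).map (· + x) := by
      rw [List.filter_map]
      congr 1
      apply List.filter_congr
      intro s _
      simp only [Function.comp]
      simp only [decide_eq_decide]
      omega
    rw [hmap, pvF_append, pvF_map_add _ x hx]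
    · rfl
    · refine List.mem_filter.2 ⟨pvSums_zero_mem p, ?_⟩
      simp only [decide_eq_true_eq]; omega

-- A's fold invariant: after processing prefix p, the row is pvM p · over 0..C
theorem pvA_row (C : Int) (hC : 0 ≤ C) (p : List Int) (hp : ∀ x ∈ p, 0 ≤ x) :
    p.foldl
      (fun prev x =>
        (PySem.List.pyRange 0 (C + 1)).map (fun j =>
          if j < x then PySem.List.pyGetD prev j 0
          else max (PySem.List.pyGetD prev j 0) (PySem.List.pyGetD prev (j - x) 0 + x)))
      (List.replicate (C + 1).toNat 0)
    = (PySem.List.pyRange 0 (C + 1)).map (fun j => pvM p j) := by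
  induction p using List.reverseRecOn with
  | nil =>
    simp only [List.foldl_nil]
    have hrg := PySem.List.pyRange_zero_natCast (C + 1).toNat
    rw [show (((C + 1).toNat : Nat) : Int) = C + 1 by omega] at hrg
    rw [hrg, List.map_map]
    symm
    rw [List.eq_replicate_iff]
    constructor
    · simp
    · intro b hb
      rcases List.mem_map.1 hb with ⟨k, _, rfl⟩
      simp only [Function.comp]
      rw [pvM_nil _ (Int.natCast_nonneg k)]
  | append_singleton q x ih =>
    have hq : ∀ y ∈ q, 0 ≤ y := fun y hy => hp y (List.mem_append_left _ hy)
    have hx : 0 ≤ x := hp x (List.mem_append_right _ (by simp))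
    rw [List.foldl_append, List.foldl_cons, List.foldl_nil, ih hq]
    have hn : C + 1 = ((C + 1).toNat : Int) := by omega
    apply List.map_congr_left
    intro j hj
    rcases PySem.List.mem_pyRange_one.1 hj with ⟨hj0, hjC⟩
    have hget : ∀ (i : Int), 0 ≤ i → i ≤ C →
        PySem.List.pyGetD ((PySem.List.pyRange 0 (C + 1)).map (fun j => pvM q j)) i 0 = pvM q i := by
      intro i hi0 hiC
      have hi : i = ((i.toNat : Nat) : Int) := by omega
      rw [hn, hi]
      exact PySem.List.pyGetD_map_pyRange _ _ _ _ (by omega)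
    rw [pvM_snoc q x j hx (pvSums_nonneg q hq)]
    by_cases hcase : j < x
    · rw [if_pos hcase, if_pos hcase, hget j hj0 (by omega)]
    · rw [if_neg hcase, if_neg hcase, hget j hj0 (by omega), hget (j - x) (by omega) (by omega)]

-- B's fold invariant: the reachable set holds exactly the subset sums ≤ C
theorem pvB_reach (C : Int) (hC : 0 ≤ C) : ∀ (p : List Int), (∀ x ∈ p, 0 ≤ x) → ∀ (t : Int),
    t ∈ p.foldl
      (fun r x => PySem.Set.union r (PySem.Set.ofList ((r.filter (fun s => s + x ≤ C)).map (fun s => s + x))))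
      (PySem.Set.ofList [0])
    ↔ t ∈ pvSums p ∧ t ≤ C := by
  intro p
  induction p using List.reverseRecOn with
  | nil =>
    intro _ t
    simp only [List.foldl_nil, PySem.Set.mem_ofList, List.mem_singleton, pvSums, List.foldl_nil]
    constructor
    · rintro rfl; exact ⟨by simp, hC⟩
    · rintro ⟨h, _⟩; simpa using h
  | append_singleton q x ih =>
    intro hp t
    have hq : ∀ y ∈ q, 0 ≤ y := fun y hy => hp y (List.mem_append_left _ hy)
    have hx : 0 ≤ x := hp x (List.mem_append_right _ (by simp))
    rw [List.foldl_append, List.foldl_cons, List.foldl_nil]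
    rw [PySem.Set.mem_union, PySem.Set.mem_ofList, pvSums_append]
    constructor
    · rintro (h | h)
      · rcases (ih hq t).1 h with ⟨h1, h2⟩
        exact ⟨List.mem_append_left _ h1, h2⟩
      · rcases List.mem_map.1 h with ⟨s, hsf, hst⟩
        rcases List.mem_filter.1 hsf with ⟨hsr, hle⟩
        simp only [decide_eq_true_eq] at hle
        rcases (ih hq s).1 hsr with ⟨h1, _⟩
        rw [← hst]
        exact ⟨List.mem_append_right _ (List.mem_map.2 ⟨s, h1, rfl⟩), hle⟩
    · rintro ⟨h1, h2⟩
      rcases List.mem_append.1 h1 with h | h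
      · exact Or.inl ((ih hq t).2 ⟨h, h2⟩)
      · rcases List.mem_map.1 h with ⟨s, hsm, hst⟩
        have hs0 : 0 ≤ s := pvSums_nonneg q hq s hsm
        refine Or.inr (List.mem_map.2 ⟨s, List.mem_filter.2 ⟨(ih hq s).2 ⟨hsm, by omega⟩, ?_⟩, hst⟩)
        simp only [decide_eq_true_eq]
        omega

-- ===== VERDICT (by name: the statement is the Claim_ definition above) =====
theorem findSubset3_spec : Claim_equal_findSubset3 := by
  intro array C _ hpre
  rcases hpre with ⟨hC, hp⟩
  unfold Spec_findSubset3 findSubset3 findSubset3_alt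
  rw [pvA_row C hC array hp]
  -- left side: read entry C of the final row = pvM array C
  have hn : C + 1 = ((C + 1).toNat : Int) := by omega
  have hA : PySem.List.pyGetD ((PySem.List.pyRange 0 (C + 1)).map (fun j => pvM array j)) C 0
      = pvM array C := by
    have hi : C = ((C.toNat : Nat) : Int) := by omega
    rw [hn, hi]
    exact PySem.List.pyGetD_map_pyRange _ _ _ _ (by omega)
  rw [hA]
  -- right side: max of the reachable set = pvM array C
  show pvM array C = (PySem.List.max?
      (array.foldl
        (fun r x => PySem.Set.union r (PySem.Set.ofList ((r.filter (fun s => s + x ≤ C)).map (fun s => s + x))))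
        (PySem.Set.ofList [0])) (fun y => y)).getD 0
  set r := array.foldl
      (fun r x => PySem.Set.union r (PySem.Set.ofList ((r.filter (fun s => s + x ≤ C)).map (fun s => s + x))))
      (PySem.Set.ofList [0]) with hr
  have hmem : ∀ t, t ∈ r ↔ t ∈ pvSums array ∧ t ≤ C := fun t => pvB_reach C hC array hp t
  have h0r : (0 : Int) ∈ r := (hmem 0).2 ⟨pvSums_zero_mem array, hC⟩
  obtain ⟨m, hm⟩ : ∃ m, PySem.List.max? r (fun y => y) = some m := by
    cases hmx : PySem.List.max? r (fun y => y) with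
    | none =>
      exfalso
      rw [(PySem.List.max?_eq_none_iff _ _).1 hmx] at h0r
      simp at h0r
    | some m => exact ⟨m, rfl⟩
  rw [hm, Option.getD_some]
  have hmr := PySem.List.max?_mem hm
  have hmax := PySem.List.max?_isMax hm
  have hF := PySem.List.le_foldl_max ((pvSums array).filter (fun s => s ≤ C)) (0 : Int)
  apply le_antisymm
  · -- pvM ≤ m
    rcases PySem.List.foldl_max_mem ((pvSums array).filter (fun s => s ≤ C)) (0 : Int) with h | h
    · rw [pvM, h]
      rcases (hmem m).1 hmr with ⟨hms, hmC⟩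
      exact hmax 0 h0r
    · rcases List.mem_filter.1 h with ⟨h1, h2⟩
      simp only [decide_eq_true_eq] at h2
      exact hmax _ ((hmem _).2 ⟨h1, h2⟩)
  · -- m ≤ pvM
    rcases (hmem m).1 hmr with ⟨hms, hmC⟩
    exact hF.2 m (List.mem_filter.2 ⟨hms, by simp only [decide_eq_true_eq]; omega⟩)
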